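-- pv_equiv track=rewrite | github.com/marrink-lab/vermouth-martinize | vermouth/processors/do_mapping.py | cover
-- ===== SOURCE A (Python) =====
-- def cover(to_cover, options):
--     """
--     Implements a recursive backtracking algorithm to cover all elements of
--     `to_cover` with the elements from `options` that have the lowest index.
--     In this context "to cover" means that all items in an element of `options`
--     must be in `to_cover`. Elements in `to_cover` can only be covered *once*.
--
--     Parameters
--     ----------
--     to_cover: collections.abc.MutableSet
--         The items that should be covered.
--     options: collections.abc.Sequence[collections.abc.MutableSet]
--         The elements that can be used to cover `to_cover`. All items in an
--         element of `options` must be present in `to_cover` to qualify.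
--
--     Returns
--     -------
--     None or list
--         None if no covering can be found, or the list of items from `options`
--         with the lowest indices that exactly covers `to_cover`.
--     """
--     if not to_cover:
--         return []
--     for idx, option in enumerate(options):
--         if all(item in to_cover for item in option):
--             left_to_cover = to_cover.copy()
--             for item in option:
--                 # Only remove the leftmost item. PS. we know for sure all items
--                 # in option are in left_to_cover at least once.
--                 left_to_cover.remove(item)
--             found = cover(left_to_cover, options[idx:])
--             if found is not None:
--                 return [option] + found
--     return None
-- ===== SOURCE B (Python) =====
-- def _take(remaining, option):
--     """One pass that both checks and removes: decrement the count of each item of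
--     option in a copy of remaining; None as soon as a count is exhausted."""
--     taken = dict(remaining)
--     for item in option:
--         if taken.get(item, 0) == 0:
--             return None
--         taken[item] = taken[item] - 1
--     return taken
--
--
-- def cover(to_cover, options):
--     """Explicit-stack DFS over (remaining-counts, size, options-suffix, path) states
--     instead of recursion; `remaining` is a dict of item counts, the guard and the removal are the single _take pass, and empty options
--     (which make no progress) are skipped, so the search always terminates.  Trying
--     option idx pushes a resume state (remaining, size, opts[idx+1:], path) below the
--     child state, reproducing the lowest-index-first order of the original."""
--     counts = {}
--     size = 0
--     for item in to_cover:
--         counts[item] = counts.get(item, 0) + 1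
--         size = size + 1
--     stack = [(counts, size, options, [])]
--     while stack:
--         remaining, size, opts, path = stack.pop()
--         if size == 0:
--             return path
--         for idx, option in enumerate(opts):
--             if not option:
--                 continue
--             reduced = _take(remaining, option)
--             if reduced is not None:
--                 stack.append((remaining, size, opts[idx + 1:], path))
--                 stack.append((reduced, size - len(option), opts[idx:], path + [option]))
--                 break
--     return None
-- ===== Notes on version B (the rewrite author's own statement) =====
-- stated objective: alternative
-- what changed: The recursive backtracking becomes an explicit-stack DFS over (remaining-counts, size, options-suffix, path) states, where remaining is a dict of item counts and the guard and the removal are a single decrement-each-count pass that skips empty options, so B always terminates: it returns A's exact cover wherever A returns and still returns a value where A raises.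
-- outside the precondition, e.g. on cover({1}, [{1}, set()]): A returns [{1}], B returns [{1}]; on cover({1, 2}, [{1}, {2}, set()]): A returns [{1}, {2}], B returns [{1}, {2}]
import Mathlib
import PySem

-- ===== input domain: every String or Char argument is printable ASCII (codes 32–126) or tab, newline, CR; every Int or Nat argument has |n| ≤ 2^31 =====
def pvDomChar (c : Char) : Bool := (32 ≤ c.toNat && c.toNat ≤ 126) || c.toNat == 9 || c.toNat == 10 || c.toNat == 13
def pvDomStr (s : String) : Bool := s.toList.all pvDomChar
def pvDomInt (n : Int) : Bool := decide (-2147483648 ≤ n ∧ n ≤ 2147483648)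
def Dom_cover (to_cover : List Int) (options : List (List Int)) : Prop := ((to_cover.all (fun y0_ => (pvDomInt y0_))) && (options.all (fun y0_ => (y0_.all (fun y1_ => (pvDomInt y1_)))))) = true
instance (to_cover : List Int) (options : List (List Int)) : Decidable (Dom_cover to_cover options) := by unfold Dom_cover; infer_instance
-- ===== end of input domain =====

-- B changes the decomposition (recursion -> explicit-stack DFS with a one-pass take guard);
-- same worst-case cost; return values only, neither version mutates its arguments.

-- ===== PORT A =====
-- the `for item in option: left_to_cover.remove(item)` loop; List.erase removes the
-- leftmost occurrence exactly like list.remove; inside Pre_cover this loop never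
-- reaches a missing item, so Python's remove never raises there.
def removeAllA (tc : List Int) (opt : List Int) : List Int :=
  opt.foldl (fun acc item => acc.erase item) tc

-- the `for idx, option in enumerate(options)` loop; the list argument is options[idx:],
-- so each step sees the current suffix (opt :: rest = options[idx:]).
-- `rec` is the recursive call to cover; outer `none` = fuel exhausted (unreachable under Pre_cover).
def loopA (rec : List Int → List (List Int) → Option (Option (List (List Int))))
    (tc : List Int) : List (List Int) → Option (Option (List (List Int)))
  | [] => some none
  | opt :: rest =>
    if opt.all (fun item => tc.contains item) then
      match rec (removeAllA tc opt) (opt :: rest) with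
      | none => none
      | some (some found) => some (some (opt :: found))
      | some none => loopA rec tc rest
    else loopA rec tc rest

-- A's recursion, with a fuel counter as totality guard (A raises on inputs outside
-- Pre_cover; inside Pre_cover the recursion depth is at most to_cover.length, so the
-- fuel below never runs out and the port is exact).
def coverFuel : Nat → List Int → List (List Int) → Option (Option (List (List Int)))
  | 0, _, _ => none
  | f + 1, tc, opts => if tc = [] then some (some []) else loopA (coverFuel f) tc opts

def cover (to_cover : List Int) (options : List (List Int)) : Option (List (List Int)) :=
  (coverFuel (to_cover.length + 1) to_cover options).getD none

-- ===== PORT B =====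
-- Source B's _take: one pass over option that both checks and removes, decrementing the
-- count of each item in a copy of the remaining-counts dict, None as soon as a count
-- is exhausted (taken.get(item, 0) -> PySem.Dict.getD).
def takeB (taken : PySem.Dict Int Int) : List Int → Option (PySem.Dict Int Int)
  | [] => some taken
  | item :: rest =>
    if taken.getD item 0 = 0 then none
    else takeB (taken.insert item (taken.getD item 0 - 1)) rest

-- Source B's `for idx, option in enumerate(opts): ...; break` scan of one iteration;
-- returns the first usable option with its reduced counts and the options after it
-- (so opt :: after = opts[idx:], after = opts[idx+1:]); none if the loop falls through.
def scanB (rem : PySem.Dict Int Int) : List (List Int) →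
    Option (List Int × PySem.Dict Int Int × List (List Int))
  | [] => none
  | opt :: rest =>
    if opt = [] then scanB rem rest
    else
      match takeB rem opt with
      | some reduced => some (opt, reduced, rest)
      | none => scanB rem rest

-- Source B's `while stack:` loop over states (remaining, size, opts, path); the list head
-- is the stack top, so the two Python appends appear as two conses with the last-pushed
-- (the child) first.  Fuel = iteration counter as structural totality guard only (the
-- fuel in cover_alt provably always suffices); `some none` = stack exhausted (`return None`).
def stepB : Nat → List (PySem.Dict Int Int × Int × List (List Int) × List (List Int)) →
    Option (Option (List (List Int)))
  | 0, _ => none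
  | _ + 1, [] => some none
  | f + 1, (rem, size, opts, path) :: rest =>
    if size = 0 then some (some path)
    else
      match scanB rem opts with
      | none => stepB f rest
      | some (opt, reduced, after) =>
        stepB f ((reduced, size - opt.length, opt :: after, path ++ [opt])
          :: (rem, size, after, path) :: rest)

-- the `counts[item] = counts.get(item, 0) + 1; size = size + 1` loop over to_cover
def countsB (to_cover : List Int) : PySem.Dict Int Int × Int :=
  to_cover.foldl (fun p item => (p.1.insert item (p.1.getD item 0 + 1), p.2 + 1))
    (PySem.Dict.empty, 0)

def cover_alt (to_cover : List Int) (options : List (List Int)) : Option (List (List Int)) :=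
  (stepB (2 ^ (to_cover.length + options.length + 1))
    [((countsB to_cover).1, (countsB to_cover).2, options, [])]).getD none

-- ===== PRECONDITION & SPEC =====
-- Pre_ excludes the inputs on which A's backtracking can raise: a reachable empty option
-- (which always qualifies and recurses on unchanged arguments -> RecursionError) or an
-- option repeating an item (whose second remove can fail at some reached state ->
-- ValueError); A's exact raising condition is not closed-form, so Pre_ keeps the natural
-- safe domain — every option nonempty and duplicate-free, or inert (an item outside
-- to_cover) — and on every excluded input where A does return, B returns the identical
-- value (see the cited examples), and where A raises (RecursionError / ValueError) B
-- still returns a value: the cover found without the empty / over-demanding options,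
-- or none.
def Pre_cover (to_cover : List Int) (options : List (List Int)) : Prop :=
  to_cover = [] ∨ ∀ o ∈ options, o ≠ [] ∧ (o.Nodup ∨ ∃ x ∈ o, x ∉ to_cover)
instance (to_cover : List Int) (options : List (List Int)) : Decidable (Pre_cover to_cover options) := by unfold Pre_cover; infer_instance

def pvWitness_cover : List Int × List (List Int) := ([1, 2, 3], [[1], [2, 3], [2]])

def Spec_cover (to_cover : List Int) (options : List (List Int)) (out : Option (List (List Int))) : Prop := out = cover_alt to_cover options
instance (to_cover : List Int) (options : List (List Int)) (out : Option (List (List Int))) : Decidable (Spec_cover to_cover options out) := by unfold Spec_cover; infer_instance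

-- ===== CLAIM (what is proved, stated in full; the proofs are below) =====
def Claim_equal_cover : Prop := ∀ (to_cover : List Int) (options : List (List Int)), Dom_cover to_cover options → Pre_cover to_cover options → Spec_cover to_cover options (cover to_cover options)

-- ===== LEMMAS AND PROOFS =====

-- the state invariant: every option is nonempty and either duplicate-free or inert
-- (contains an item absent from the current remaining, hence from every descendant's)
def QOpts (rem : List Int) (opts : List (List Int)) : Prop :=
  ∀ o ∈ opts, o ≠ [] ∧ (o.Nodup ∨ ∃ x ∈ o, x ∉ rem)

-- the abstraction relation between Source B's counts dict and A's remaining list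
def CntR (rem : List Int) (d : PySem.Dict Int Int) : Prop :=
  ∀ x : Int, d.getD x 0 = (rem.count x : Int)

theorem removeAllA_subset (opt : List Int) : ∀ (tc : List Int) (a : Int),
    a ∈ removeAllA tc opt → a ∈ tc := by
  induction opt with
  | nil => intro tc a h; simpa [removeAllA] using h
  | cons x xs ih =>
    intro tc a h
    have : a ∈ tc.erase x := ih (tc.erase x) a (by simpa [removeAllA, List.foldl_cons] using h)
    exact List.mem_of_mem_erase this

theorem QOpts_mono (rem rem' : List Int) (opts : List (List Int))
    (hsub : ∀ a, a ∈ rem' → a ∈ rem) (h : QOpts rem opts) : QOpts rem' opts := by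
  intro o ho
  obtain ⟨h1, h2⟩ := h o ho
  refine ⟨h1, ?_⟩
  rcases h2 with h2 | ⟨x, hx, hxn⟩
  · exact Or.inl h2
  · exact Or.inr ⟨x, hx, fun hc => hxn (hsub x hc)⟩

theorem QOpts_of_sublist (rem : List Int) (opts opts' : List (List Int))
    (hs : opts'.Sublist opts) (h : QOpts rem opts) : QOpts rem opts' :=
  fun o ho => h o (hs.mem ho)

theorem guard_nodup (rem : List Int) (opts : List (List Int)) (o : List Int)
    (hQ : QOpts rem opts) (ho : o ∈ opts)
    (hall : o.all (fun item => rem.contains item) = true) : o ≠ [] ∧ o.Nodup := by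
  obtain ⟨h1, h2⟩ := hQ o ho
  refine ⟨h1, ?_⟩
  rcases h2 with h2 | ⟨x, hx, hxn⟩
  · exact h2
  · exact absurd (by simpa [List.contains_iff_mem] using List.all_eq_true.mp hall x hx) hxn

theorem removeAllA_length_le (opt : List Int) : ∀ tc : List Int,
    (removeAllA tc opt).length ≤ tc.length := by
  induction opt with
  | nil => intro tc; simp [removeAllA]
  | cons x xs ih =>
    intro tc
    have h1 := ih (tc.erase x)
    have h2 : (tc.erase x).length ≤ tc.length := List.length_erase_le ..
    simpa [removeAllA, List.foldl_cons] using le_trans h1 h2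

theorem removeAllA_length_lt (tc opt : List Int) (hne : opt ≠ [])
    (hall : opt.all (fun item => tc.contains item) = true) :
    (removeAllA tc opt).length < tc.length := by
  cases opt with
  | nil => exact absurd rfl hne
  | cons x xs =>
    have hx : x ∈ tc := by
      have := List.all_eq_true.mp hall x (by simp)
      simpa [List.contains_iff_mem] using this
    have h1 : (removeAllA (tc.erase x) xs).length ≤ (tc.erase x).length :=
      removeAllA_length_le xs (tc.erase x)
    have h2 : (tc.erase x).length = tc.length - 1 := List.length_erase_of_mem hx
    have h3 : 1 ≤ tc.length := List.length_pos_of_mem hx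
    have : removeAllA tc (x :: xs) = removeAllA (tc.erase x) xs := by
      simp [removeAllA, List.foldl_cons]
    rw [this]; omega

theorem removeAllA_cons_eq (rem : List Int) (y : Int) (ys : List Int) :
    removeAllA rem (y :: ys) = removeAllA (rem.erase y) ys := by
  simp [removeAllA, List.foldl_cons]

-- CntR survives removing one copy of a present item on both sides
theorem CntR_erase (rem : List Int) (d : PySem.Dict Int Int) (y : Int)
    (hR : CntR rem d) (hy : y ∈ rem) :
    CntR (rem.erase y) (d.insert y (d.getD y 0 - 1)) := by
  intro z
  rw [PySem.Dict.getD_insert]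
  by_cases hz : z = y
  · subst hz
    rw [if_pos rfl, hR z, List.count_erase_self]
    have : 1 ≤ rem.count z := List.count_pos_iff.mpr hy
    omega
  · rw [if_neg hz, hR z, List.count_erase_of_ne hz]

theorem takeB_none_of_not_mem (opt : List Int) : ∀ (rem : List Int) (d : PySem.Dict Int Int)
    (x : Int), CntR rem d → x ∈ opt → x ∉ rem → takeB d opt = none := by
  induction opt with
  | nil => intro rem d x _ h; simp at h
  | cons y ys ih =>
    intro rem d x hR hx hxn
    by_cases hy : d.getD y 0 = 0
    · rw [takeB, if_pos hy]
    · have hymem : y ∈ rem := by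
        rcases List.count_pos_iff.mp (by
          have := hR y
          omega : 0 < rem.count y) with h
        exact h
      rcases List.mem_cons.mp hx with rfl | hx'
      · exact absurd hymem hxn
      · rw [takeB, if_neg hy]
        exact ih (rem.erase y) _ x (CntR_erase rem d y hR hymem) hx'
          (fun hc => hxn (List.mem_of_mem_erase hc))

theorem takeB_some_of_nodup (opt : List Int) : ∀ (rem : List Int) (d : PySem.Dict Int Int),
    opt.Nodup → (∀ x ∈ opt, x ∈ rem) → CntR rem d →
    ∃ d', takeB d opt = some d' ∧ CntR (removeAllA rem opt) d' := by
  induction opt with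
  | nil =>
    intro rem d _ _ hR
    exact ⟨d, rfl, by simpa [removeAllA] using hR⟩
  | cons y ys ih =>
    intro rem d hnd hmem hR
    have hymem : y ∈ rem := hmem y (by simp)
    have hy : ¬ d.getD y 0 = 0 := by
      have h1 := hR y
      have h2 : 1 ≤ rem.count y := List.count_pos_iff.mpr hymem
      omega
    have hnd' : ys.Nodup := (List.nodup_cons.mp hnd).2
    have hyn : y ∉ ys := (List.nodup_cons.mp hnd).1
    have hmem' : ∀ x ∈ ys, x ∈ rem.erase y := by
      intro x hx
      have hne : x ≠ y := fun h => hyn (h ▸ hx)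
      exact (List.mem_erase_of_ne hne).mpr (hmem x (by simp [hx]))
    obtain ⟨d', h1, h2⟩ :=
      ih (rem.erase y) (d.insert y (d.getD y 0 - 1)) hnd' hmem' (CntR_erase rem d y hR hymem)
    refine ⟨d', ?_, ?_⟩
    · rw [takeB, if_neg hy, h1]
    · rw [removeAllA_cons_eq]; exact h2

theorem removeAllA_length_add (opt : List Int) : ∀ rem : List Int,
    opt.Nodup → (∀ x ∈ opt, x ∈ rem) →
    (removeAllA rem opt).length + opt.length = rem.length := by
  induction opt with
  | nil => intro rem _ _; simp [removeAllA]
  | cons y ys ih =>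
    intro rem hnd hmem
    have hymem : y ∈ rem := hmem y (by simp)
    have hnd' : ys.Nodup := (List.nodup_cons.mp hnd).2
    have hyn : y ∉ ys := (List.nodup_cons.mp hnd).1
    have hmem' : ∀ x ∈ ys, x ∈ rem.erase y := by
      intro x hx
      have hne : x ≠ y := fun h => hyn (h ▸ hx)
      exact (List.mem_erase_of_ne hne).mpr (hmem x (by simp [hx]))
    have h1 := ih (rem.erase y) hnd' hmem'
    have h2 : (rem.erase y).length = rem.length - 1 := List.length_erase_of_mem hymem
    have h3 : 1 ≤ rem.length := List.length_pos_of_mem hymem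
    rw [removeAllA_cons_eq]
    simp only [List.length_cons]
    omega

-- guard correspondence: under CntR and QOpts, A's membership guard passes iff
-- Source B's take succeeds, and then the reduced counts abstract removeAllA
theorem takeB_none_of_guard_fail (rem : List Int) (d : PySem.Dict Int Int) (o : List Int)
    (hR : CntR rem d) (hg : ¬ o.all (fun item => rem.contains item) = true) :
    takeB d o = none := by
  have : ∃ x ∈ o, x ∉ rem := by
    by_contra hc
    push Not at hc
    exact hg (List.all_eq_true.mpr fun x hx => by
      simpa [List.contains_iff_mem] using hc x hx)
  obtain ⟨x, hx, hxn⟩ := this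
  exact takeB_none_of_not_mem o rem d x hR hx hxn

theorem takeB_of_guard_pass (rem : List Int) (d : PySem.Dict Int Int)
    (opts : List (List Int)) (o : List Int) (hR : CntR rem d) (hQ : QOpts rem opts)
    (ho : o ∈ opts) (hg : o.all (fun item => rem.contains item) = true) :
    ∃ d', takeB d o = some d' ∧ CntR (removeAllA rem o) d' := by
  obtain ⟨-, hnd⟩ := guard_nodup rem opts o hQ ho hg
  exact takeB_some_of_nodup o rem d hnd (fun x hx => by
    simpa [List.contains_iff_mem] using List.all_eq_true.mp hg x hx) hR

-- A's loop outcome as a function of Source B's scan, on states satisfying CntR and QOpts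
theorem loopA_of_scanB_none (rec : List Int → List (List Int) → Option (Option (List (List Int))))
    (rem : List Int) (d : PySem.Dict Int Int) (l : List (List Int))
    (hR : CntR rem d) (hQ : QOpts rem l)
    (h : scanB d l = none) : loopA rec rem l = some none := by
  induction l with
  | nil => simp [loopA]
  | cons o rest ih =>
    have hne : o ≠ [] := (hQ o (by simp)).1
    have hQr : QOpts rem rest := fun o' ho' => hQ o' (by simp [ho'])
    rw [scanB, if_neg hne] at h
    have hg : ¬ o.all (fun item => rem.contains item) = true := by
      intro hg
      obtain ⟨d', hd', -⟩ := takeB_of_guard_pass rem d (o :: rest) o hR hQ (by simp) hg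
      rw [hd'] at h
      exact absurd h (by simp)
    rw [takeB_none_of_guard_fail rem d o hR hg] at h
    rw [loopA, if_neg hg]
    exact ih hQr h

theorem loopA_of_scanB_some (rec : List Int → List (List Int) → Option (Option (List (List Int))))
    (rem : List Int) (d : PySem.Dict Int Int) (l : List (List Int)) (opt : List Int)
    (reduced : PySem.Dict Int Int) (after : List (List Int))
    (hR : CntR rem d) (hQ : QOpts rem l) (h : scanB d l = some (opt, reduced, after)) :
    CntR (removeAllA rem opt) reduced ∧ (opt :: after).Sublist l ∧
      opt.all (fun item => rem.contains item) = true ∧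
      loopA rec rem l =
        match rec (removeAllA rem opt) (opt :: after) with
        | none => none
        | some (some found) => some (some (opt :: found))
        | some none => loopA rec rem after := by
  induction l with
  | nil => simp [scanB] at h
  | cons o rest ih =>
    have hne : o ≠ [] := (hQ o (by simp)).1
    have hQr : QOpts rem rest := fun o' ho' => hQ o' (by simp [ho'])
    rw [scanB, if_neg hne] at h
    by_cases hg : o.all (fun item => rem.contains item) = true
    · obtain ⟨d', hd', hR'⟩ := takeB_of_guard_pass rem d (o :: rest) o hR hQ (by simp) hg
      rw [hd'] at h
      obtain ⟨rfl, rfl, rfl⟩ : o = opt ∧ d' = reduced ∧ rest = after := by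
        refine ⟨?_, ?_, ?_⟩ <;> (injection h with h'; cases h'; rfl)
      rw [loopA, if_pos hg]
      exact ⟨hR', List.Sublist.refl _, hg, rfl⟩
    · rw [takeB_none_of_guard_fail rem d o hR hg] at h
      obtain ⟨h1, h2, h3, h4⟩ := ih hQr h
      rw [loopA, if_neg hg]
      exact ⟨h1, h2.trans (List.sublist_cons_self o rest), h3, h4⟩

theorem loopA_congr (rec1 rec2 : List Int → List (List Int) → Option (Option (List (List Int))))
    (tc : List Int) (l : List (List Int)) (hQ : QOpts tc l)
    (h : ∀ left opts', QOpts left opts' → left.length < tc.length →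
      rec1 left opts' = rec2 left opts') :
    loopA rec1 tc l = loopA rec2 tc l := by
  induction l with
  | nil => simp [loopA]
  | cons opt rest ih =>
    have hQr : QOpts tc rest := fun o ho => hQ o (by simp [ho])
    by_cases hg : opt.all (fun item => tc.contains item) = true
    · have hlt := removeAllA_length_lt tc opt (hQ opt (by simp)).1 hg
      have hQ' : QOpts (removeAllA tc opt) (opt :: rest) :=
        QOpts_mono tc _ _ (removeAllA_subset opt tc) hQ
      rw [loopA, loopA, if_pos hg, if_pos hg, h _ _ hQ' hlt]
      cases rec2 (removeAllA tc opt) (opt :: rest) with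
      | none => rfl
      | some v => cases v with
        | none => simpa using ih hQr
        | some found => rfl
    · rw [loopA, loopA, if_neg hg, if_neg hg]; exact ih hQr

theorem loopA_ne_none (rec : List Int → List (List Int) → Option (Option (List (List Int))))
    (tc : List Int) (l : List (List Int)) (hQ : QOpts tc l)
    (h : ∀ left opts', QOpts left opts' → left.length < tc.length →
      rec left opts' ≠ none) :
    loopA rec tc l ≠ none := by
  induction l with
  | nil => simp [loopA]
  | cons opt rest ih =>
    have hQr : QOpts tc rest := fun o ho => hQ o (by simp [ho])
    by_cases hg : opt.all (fun item => tc.contains item) = true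
    · have hlt := removeAllA_length_lt tc opt (hQ opt (by simp)).1 hg
      have hQ' : QOpts (removeAllA tc opt) (opt :: rest) :=
        QOpts_mono tc _ _ (removeAllA_subset opt tc) hQ
      rw [loopA, if_pos hg]
      cases hv : rec (removeAllA tc opt) (opt :: rest) with
      | none => exact absurd hv (h _ _ hQ' hlt)
      | some v => cases v with
        | none => simpa using ih hQr
        | some found => simp
    · rw [loopA, if_neg hg]; exact ih hQr

theorem coverFuel_eq (k : Nat) : ∀ (tc : List Int) (opts : List (List Int)) (f : Nat),
    tc.length ≤ k → QOpts tc opts → tc.length < f →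
    coverFuel f tc opts = coverFuel (tc.length + 1) tc opts := by
  induction k with
  | zero =>
    intro tc opts f hk _ hf
    have : tc = [] := List.eq_nil_of_length_eq_zero (Nat.le_zero.mp hk)
    subst this
    cases f with
    | zero => omega
    | succ f => simp [coverFuel]
  | succ k ih =>
    intro tc opts f hk hQ hf
    cases f with
    | zero => omega
    | succ f =>
      by_cases htc : tc = []
      · subst htc; simp [coverFuel]
      · rw [coverFuel, coverFuel, if_neg htc, if_neg htc]
        exact loopA_congr _ _ tc opts hQ (fun left opts' hQ' hlt => by
          have h1 := ih left opts' f (by omega) hQ' (by omega)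
          have h2 := ih left opts' tc.length (by omega) hQ' hlt
          rw [h1, h2])

theorem coverFuel_ne_none (k : Nat) : ∀ (tc : List Int) (opts : List (List Int)) (f : Nat),
    tc.length ≤ k → QOpts tc opts → tc.length < f →
    coverFuel f tc opts ≠ none := by
  induction k with
  | zero =>
    intro tc opts f hk _ hf
    have : tc = [] := List.eq_nil_of_length_eq_zero (Nat.le_zero.mp hk)
    subst this
    cases f with
    | zero => omega
    | succ f => simp [coverFuel]
  | succ k ih =>
    intro tc opts f hk hQ hf
    cases f with
    | zero => omega
    | succ f =>
      by_cases htc : tc = []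
      · subst htc; simp [coverFuel]
      · rw [coverFuel, if_neg htc]
        exact loopA_ne_none _ tc opts hQ (fun left opts' hQ' hlt =>
          ih left opts' f (by omega) hQ' (by omega))

theorem coverFuel_eq_some_cover (tc : List Int) (opts : List (List Int)) (f : Nat)
    (hQ : QOpts tc opts) (hf : tc.length < f) :
    coverFuel f tc opts = some (cover tc opts) := by
  have he := coverFuel_eq tc.length tc opts f le_rfl hQ hf
  have hn := coverFuel_ne_none tc.length tc opts (tc.length + 1) le_rfl hQ (by omega)
  cases hv : coverFuel (tc.length + 1) tc opts with
  | none => exact absurd hv hn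
  | some v => rw [he, hv]; simp [cover, hv]

theorem cover_noqual (rem : List Int) (d : PySem.Dict Int Int) (opts : List (List Int))
    (hrem : rem ≠ []) (hR : CntR rem d) (hQ : QOpts rem opts)
    (h : scanB d opts = none) : cover rem opts = none := by
  have : coverFuel (rem.length + 1) rem opts = loopA (coverFuel rem.length) rem opts := by
    rw [coverFuel, if_neg hrem]
  simp [cover, this, loopA_of_scanB_none _ rem d opts hR hQ h]

theorem cover_qual (rem : List Int) (d : PySem.Dict Int Int) (opts : List (List Int))
    (opt : List Int) (reduced : PySem.Dict Int Int) (after : List (List Int))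
    (hrem : rem ≠ []) (hR : CntR rem d) (hQ : QOpts rem opts)
    (h : scanB d opts = some (opt, reduced, after)) :
    cover rem opts =
      match cover (removeAllA rem opt) (opt :: after) with
      | some found => some (opt :: found)
      | none => cover rem after := by
  obtain ⟨-, hsub, hall, hloop⟩ :=
    loopA_of_scanB_some (coverFuel rem.length) rem d opts opt reduced after hR hQ h
  have hQ' : QOpts (removeAllA rem opt) (opt :: after) :=
    QOpts_mono rem _ _ (removeAllA_subset opt rem) (QOpts_of_sublist rem opts _ hsub hQ)
  have hlt : (removeAllA rem opt).length < rem.length :=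
    removeAllA_length_lt rem opt (hQ opt (hsub.mem (by simp))).1 hall
  have hrec : coverFuel rem.length (removeAllA rem opt) (opt :: after)
      = some (cover (removeAllA rem opt) (opt :: after)) :=
    coverFuel_eq_some_cover _ _ _ hQ' hlt
  have hunf : coverFuel (rem.length + 1) rem opts = loopA (coverFuel rem.length) rem opts := by
    rw [coverFuel, if_neg hrem]
  have hunf2 : cover rem after = (loopA (coverFuel rem.length) rem after).getD none := by
    have h1 : coverFuel (rem.length + 1) rem after = loopA (coverFuel rem.length) rem after := by
      rw [coverFuel, if_neg hrem]
    simp [cover, h1]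
  rw [cover, hunf, hloop, hrec]
  cases cover (removeAllA rem opt) (opt :: after) with
  | some found => simp
  | none => simpa using hunf2.symm

-- the value the stack machine must return for a given abstract stack (proof-only helper)
def specStack : List (List Int × List (List Int) × List (List Int)) → Option (List (List Int))
  | [] => none
  | (rem, opts, path) :: rest =>
    match cover rem opts with
    | some found => some (path ++ found)
    | none => specStack rest

-- one of Source B's frames abstracts to an A-side frame: the counts dict abstracts the
-- remaining list, the size is its length, options-suffix and path are shared
def FrRel (dfr : PySem.Dict Int Int × Int × List (List Int) × List (List Int))
    (afr : List Int × List (List Int) × List (List Int)) : Prop :=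
  CntR afr.1 dfr.1 ∧ dfr.2.1 = (afr.1.length : Int) ∧ dfr.2.2.1 = afr.2.1 ∧ dfr.2.2.2 = afr.2.2

def frameBound (fr : List Int × List (List Int) × List (List Int)) : Nat :=
  2 ^ (fr.1.length + fr.2.1.length + 1) - 1

def stackBound (s : List (List Int × List (List Int) × List (List Int))) : Nat :=
  (s.map frameBound).sum

theorem stepB_eq (f : Nat) :
    ∀ dstack astack, List.Forall₂ FrRel dstack astack →
    (∀ fr ∈ astack, fr.1 = [] ∨ QOpts fr.1 fr.2.1) → stackBound astack < f →
    stepB f dstack = some (specStack astack) := by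
  induction f with
  | zero => intro dstack astack _ _ h; omega
  | succ f ih =>
    intro dstack astack hrel hgood hb
    cases hrel with
    | nil => simp [stepB, specStack]
    | @cons dfr afr drest arest hfr hrest =>
      obtain ⟨d, size, opts, path⟩ := dfr
      obtain ⟨rem, aopts, apath⟩ := afr
      obtain ⟨hR, hsz, h1, h2⟩ := hfr
      simp only at hR hsz h1 h2
      subst hsz
      cases h1
      cases h2
      have hgrest : ∀ fr ∈ arest, fr.1 = [] ∨ QOpts fr.1 fr.2.1 :=
        fun fr hfr' => hgood fr (by simp [hfr'])
      have hbrest : stackBound arest < f := by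
        have h1 : 1 ≤ frameBound (rem, opts, path) := by
          have : (1:Nat) ≤ 2 ^ (rem.length + opts.length + 1) - 1 :=
            le_tsub_of_add_le_left (by
              calc (1:Nat) + 1 = 2 ^ 1 := by norm_num
                _ ≤ 2 ^ (rem.length + opts.length + 1) :=
                    Nat.pow_le_pow_right (by norm_num) (by omega))
          simpa [frameBound] using this
        have : stackBound ((rem, opts, path) :: arest)
            = frameBound (rem, opts, path) + stackBound arest := by simp [stackBound]
        omega
      by_cases hrem : rem = []
      · subst hrem
        rw [stepB, if_pos (by simp), specStack]
        have : cover [] opts = some [] := by simp [cover, coverFuel]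
        rw [this]; simp
      · have hsz0 : ¬ ((rem.length : Int) = 0) := by
          intro h
          have h0 : rem.length = 0 := by exact_mod_cast h
          exact hrem (List.eq_nil_of_length_eq_zero h0)
        have hQ : QOpts rem opts := by
          rcases hgood (rem, opts, path) (by simp) with h | h
          · exact absurd h hrem
          · exact h
        rw [stepB, if_neg hsz0]
        cases hq : scanB d opts with
        | none =>
          show stepB f drest = some (specStack ((rem, opts, path) :: arest))
          rw [ih drest arest hrest hgrest hbrest, specStack,
            cover_noqual rem d opts hrem hR hQ hq]
        | some p =>
          obtain ⟨opt, reduced, after⟩ := p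
          obtain ⟨hR', hsub, hall, -⟩ :=
            loopA_of_scanB_some (fun _ _ => none) rem d opts opt reduced after hR hQ hq
          have hQafter : QOpts rem (opt :: after) := QOpts_of_sublist rem opts _ hsub hQ
          obtain ⟨hoptne, hoptnd⟩ := guard_nodup rem opts opt hQ (hsub.mem (by simp)) hall
          have hoptmem : ∀ x ∈ opt, x ∈ rem := fun x hx => by
            simpa [List.contains_iff_mem] using List.all_eq_true.mp hall x hx
          have hlen : (removeAllA rem opt).length + opt.length = rem.length :=
            removeAllA_length_add opt rem hoptnd hoptmem
          have hlt : (removeAllA rem opt).length < rem.length :=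
            removeAllA_length_lt rem opt hoptne hall
          have hla : after.length + 1 ≤ opts.length := by
            have := hsub.length_le; simpa using this
          have hrem1 : 1 ≤ rem.length := List.length_pos_of_ne_nil hrem
          set childA := (removeAllA rem opt, opt :: after, path ++ [opt]) with hchildA
          set resumeA := (rem, after, path) with hresumeA
          have hgood' : ∀ fr ∈ childA :: resumeA :: arest, fr.1 = [] ∨ QOpts fr.1 fr.2.1 := by
            intro fr hfr'
            rcases List.mem_cons.mp hfr' with h | h
            · subst h
              refine Or.inr ?_
              show QOpts (removeAllA rem opt) (opt :: after)
              exact QOpts_mono rem _ _ (removeAllA_subset opt rem) hQafter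
            rcases List.mem_cons.mp h with h | h
            · subst h
              exact Or.inr (fun o ho => hQafter o (List.mem_cons_of_mem _ ho))
            · exact hgrest fr h
          have hrel' : List.Forall₂ FrRel
              ((reduced, (rem.length : Int) - opt.length, opt :: after, path ++ [opt])
                :: (d, (rem.length : Int), after, path) :: drest)
              (childA :: resumeA :: arest) := by
            refine List.Forall₂.cons ⟨hR', ?_, rfl, rfl⟩ (List.Forall₂.cons ⟨hR, rfl, rfl, rfl⟩ hrest)
            show (rem.length : Int) - opt.length = ((removeAllA rem opt).length : Int)
            omega
          have hb' : stackBound (childA :: resumeA :: arest) < f := by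
            have e1 : frameBound childA
                = 2 ^ ((removeAllA rem opt).length + (after.length + 1) + 1) - 1 := by
              simp [frameBound, hchildA]
            have e2 : frameBound resumeA = 2 ^ (rem.length + after.length + 1) - 1 := by
              simp [frameBound, hresumeA]
            have l1 : 2 ^ ((removeAllA rem opt).length + (after.length + 1) + 1)
                ≤ 2 ^ (rem.length + opts.length) :=
              Nat.pow_le_pow_right (by norm_num) (by omega)
            have l2 : 2 ^ (rem.length + after.length + 1) ≤ 2 ^ (rem.length + opts.length) :=
              Nat.pow_le_pow_right (by norm_num) (by omega)
            have hps : 2 ^ (rem.length + opts.length + 1)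
                = 2 * 2 ^ (rem.length + opts.length) := by
              rw [pow_succ]; ring
            have hpos : (1:Nat) ≤ 2 ^ (rem.length + opts.length) := Nat.one_le_two_pow
            have hold : stackBound ((rem, opts, path) :: arest)
                = (2 ^ (rem.length + opts.length + 1) - 1) + stackBound arest := by
              simp [stackBound, frameBound]
            have hnew : stackBound (childA :: resumeA :: arest)
                = frameBound childA + frameBound resumeA + stackBound arest := by
              simp [stackBound]; ring
            rw [hold] at hb
            rw [hnew, e1, e2]
            omega
          show stepB f
              ((reduced, (rem.length : Int) - opt.length, opt :: after, path ++ [opt])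
                :: (d, (rem.length : Int), after, path) :: drest)
              = some (specStack ((rem, opts, path) :: arest))
          rw [ih _ _ hrel' hgood' hb']
          rw [hchildA, hresumeA]
          conv_lhs => rw [specStack]
          conv_rhs => rw [specStack]
          rw [cover_qual rem d opts opt reduced after hrem hR hQ hq,
            show specStack ((rem, after, path) :: arest)
                = match cover rem after with
                  | some found => some (path ++ found)
                  | none => specStack arest from by rw [specStack]]
          cases cover (removeAllA rem opt) (opt :: after) with
          | some found => simp
          | none => cases cover rem after <;> rfl

theorem countsB_fst (l : List Int) : ∀ (d : PySem.Dict Int Int) (n : Int),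
    (l.foldl (fun p item => (p.1.insert item (p.1.getD item 0 + 1), p.2 + 1)) (d, n)).1
      = l.foldl (fun d item => d.insert item (d.getD item 0 + 1)) d := by
  induction l with
  | nil => intro d n; rfl
  | cons x xs ih => intro d n; simp only [List.foldl_cons]; exact ih _ _

theorem countsB_snd (l : List Int) : ∀ (d : PySem.Dict Int Int) (n : Int),
    (l.foldl (fun p item => (p.1.insert item (p.1.getD item 0 + 1), p.2 + 1)) (d, n)).2
      = n + l.length := by
  induction l with
  | nil => intro d n; simp
  | cons x xs ih =>
    intro d n
    simp only [List.foldl_cons, List.length_cons]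
    rw [ih]
    push_cast
    ring

theorem countsB_CntR (l : List Int) : CntR l (countsB l).1 := by
  intro x
  rw [countsB, countsB_fst, PySem.Dict.getD_foldl_insert_add_one]
  simp

-- ===== VERDICT (by name: the statement is the Claim_ definition above) =====
theorem cover_spec : Claim_equal_cover := by
  intro tc opts _ hpre
  unfold Spec_cover
  have hgstack : ∀ fr ∈ [(tc, opts, ([] : List (List Int)))],
      fr.1 = [] ∨ QOpts fr.1 fr.2.1 := by
    intro fr hfr; simp at hfr; subst hfr
    rcases hpre with h | h
    · exact Or.inl h
    · exact Or.inr h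
  have hb : stackBound [(tc, opts, [])] < 2 ^ (tc.length + opts.length + 1) := by
    simp [stackBound, frameBound]
  have hrel : List.Forall₂ FrRel [((countsB tc).1, (countsB tc).2, opts, [])]
      [(tc, opts, [])] := by
    refine List.Forall₂.cons ⟨countsB_CntR tc, ?_, rfl, rfl⟩ List.Forall₂.nil
    show (countsB tc).2 = (tc.length : Int)
    rw [countsB, countsB_snd]
    ring
  have := stepB_eq (2 ^ (tc.length + opts.length + 1)) _ _ hrel hgstack hb
  rw [cover_alt, this, specStack]
  cases cover tc opts <;> simp [specStack]
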